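-- pv_equiv track=rewrite | github.com/daureg/magnet | veverica/grid_stretch.py | tree_path
-- ===== SOURCE A (Python) =====
-- def tree_path(u, v, parents):
--     path1, path2, history = set(), set(), {}
--     parent = u
--     while parent is not None:
--         if parent == v:
--             return len(path1)
--         path1.add(parent)
--         history[parent] = len(path1)
--         parent = parents[parent]
--     parent = v
--     while parent is not None:
--         path2.add(parent)
--         if parent in path1:
--             break
--         parent = parents[parent]
--     common = path1.intersection(path2)
--     assert len(common) == 1
--     common = list(common)[0]
--     return len(path2) + history[common] - 2
-- ===== SOURCE B (Python) =====
-- def _steps(x, target, parents):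
--     d = 0
--     while x != target:
--         x = parents[x]
--         d += 1
--     return d
--
--
-- def tree_path(u, v, parents):
--     # Find the lowest common ancestor first (ancestor set of u, then scan up
--     # from v), then measure the two legs with two independent counting
--     # re-walks; no depth history or set intersection is kept.
--     anc = set()
--     node = u
--     lca = None
--     while node is not None:
--         if node == v:
--             lca = v
--             break
--         anc.add(node)
--         node = parents[node]
--     if lca is None:
--         node = v
--         while node is not None and node not in anc:
--             node = parents[node]
--         assert node is not None, "no common ancestor"
--         lca = node
--     return _steps(u, lca, parents) + _steps(v, lca, parents)
-- ===== Notes on version B (the rewrite author's own statement) =====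
-- stated objective: alternative
-- what changed: B first locates the LCA (ancestor set of u, then a scan up from v) and then measures the two legs with two independent counting re-walks from u and from v, eliminating A's 1-based depth-history dict, the second set and the set-intersection/-2 arithmetic.
import Mathlib
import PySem

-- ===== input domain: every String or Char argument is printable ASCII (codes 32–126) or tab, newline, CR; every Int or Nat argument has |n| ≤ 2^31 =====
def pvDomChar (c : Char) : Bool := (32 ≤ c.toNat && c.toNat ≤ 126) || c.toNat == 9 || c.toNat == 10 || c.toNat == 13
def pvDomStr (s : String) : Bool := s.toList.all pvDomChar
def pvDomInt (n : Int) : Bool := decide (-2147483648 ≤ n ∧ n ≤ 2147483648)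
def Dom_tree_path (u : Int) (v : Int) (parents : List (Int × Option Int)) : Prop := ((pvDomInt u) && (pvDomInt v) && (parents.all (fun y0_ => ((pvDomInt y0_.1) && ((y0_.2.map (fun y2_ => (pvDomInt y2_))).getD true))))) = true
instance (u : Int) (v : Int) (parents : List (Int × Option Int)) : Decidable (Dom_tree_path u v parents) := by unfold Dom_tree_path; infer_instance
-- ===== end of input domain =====

-- B locates the LCA first (ancestor set of u, scan up from v) and then measures the two legs
-- with two independent counting re-walks, dropping A's depth-history dict, second set and
-- intersection/-2 arithmetic (objective: alternative, same cost).

-- ===== PORT A =====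
-- parents[x], shared by both ports (both Pythons do the same dict lookup); a missing key is
-- Python's KeyError, excluded by Pre_ (modelled as chain end here)
def lookPar (parents : List (Int × Option Int)) (x : Int) : Option Int :=
  ((PySem.Dict.mk parents).get? x).getD none

-- first while loop: returns len(path1) early (inl) or the final (path1, history) (inr);
-- fuel parents.length+1 suffices on every input Pre_ admits (an acyclic parent chain visits
-- each key at most once)
def treeLoop1 (parents : List (Int × Option Int)) (v : Int) :
    Nat → Option Int → PySem.Set Int → PySem.Dict Int Int →
    Sum Int (PySem.Set Int × PySem.Dict Int Int)
  | 0, _, s, h => .inr (s, h)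
  | _ + 1, none, s, h => .inr (s, h)
  | f + 1, some p, s, h =>
      if p = v then .inl (PySem.Set.len s)
      else
        let s' := PySem.Set.add s p
        let h' := h.insert p (PySem.Set.len s')
        treeLoop1 parents v f (lookPar parents p) s' h'

-- second while loop: accumulates path2, breaking at the first node in path1
def treeLoop2 (parents : List (Int × Option Int)) (path1 : PySem.Set Int) :
    Nat → Option Int → PySem.Set Int → PySem.Set Int
  | 0, _, s2 => s2
  | _ + 1, none, s2 => s2
  | f + 1, some p, s2 =>
      let s2' := PySem.Set.add s2 p
      if PySem.Set.contains path1 p then s2'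
      else treeLoop2 parents path1 f (lookPar parents p) s2'

def tree_path (u : Int) (v : Int) (parents : List (Int × Option Int)) : Int :=
  match treeLoop1 parents v (parents.length + 1) (some u) PySem.Set.empty PySem.Dict.empty with
  | .inl r => r
  | .inr (path1, history) =>
      let path2 := treeLoop2 parents path1 (parents.length + 1) (some v) PySem.Set.empty
      match PySem.Set.inter path1 path2 with
      | [c] => PySem.Set.len path2 + history.getD c 0 - 2
      | _ => 0   -- assert len(common) == 1 fails: AssertionError, excluded by Pre_

-- ===== PORT B =====
-- _steps of Source B: count parent hops from x until target is reached (unreachable cases are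
-- excluded by Pre_; fuel only makes the walk total)
def altSteps (parents : List (Int × Option Int)) (target : Int) :
    Nat → Option Int → Int → Int
  | 0, _, d => d
  | _ + 1, none, d => d   -- x = None != target, then parents[None]: KeyError, excluded by Pre_
  | f + 1, some x, d =>
      if x = target then d
      else altSteps parents target f (lookPar parents x) (d + 1)

-- first while loop of Source B: break with lca = v (inl) or finish with the ancestor set (inr)
def altFind (parents : List (Int × Option Int)) (v : Int) :
    Nat → Option Int → PySem.Set Int → Sum Unit (PySem.Set Int)
  | 0, _, s => .inr s
  | _ + 1, none, s => .inr s
  | f + 1, some p, s =>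
      if p = v then .inl ()
      else altFind parents v f (lookPar parents p) (PySem.Set.add s p)

-- second while loop of Source B: the first node of the walk from v lying in anc (none = fell off)
def altScan (parents : List (Int × Option Int)) (anc : PySem.Set Int) :
    Nat → Option Int → Option Int
  | 0, _ => none
  | _ + 1, none => none
  | f + 1, some p =>
      if PySem.Set.contains anc p then some p
      else altScan parents anc f (lookPar parents p)

def tree_path_alt (u : Int) (v : Int) (parents : List (Int × Option Int)) : Int :=
  match altFind parents v (parents.length + 1) (some u) PySem.Set.empty with
  | .inl () =>
      altSteps parents v (parents.length + 1) (some u) 0 +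
        altSteps parents v (parents.length + 1) (some v) 0
  | .inr anc =>
      match altScan parents anc (parents.length + 1) (some v) with
      | some l =>
          altSteps parents l (parents.length + 1) (some u) 0 +
            altSteps parents l (parents.length + 1) (some v) 0
      | none => 0   -- assert node is not None fails: AssertionError, excluded by Pre_

-- ===== PRECONDITION & SPEC =====
-- the ancestor chain of u up to (excluding) v: some c ↔ the first loop meets v after c.length
-- defined lookups
def pvChainTo (parents : List (Int × Option Int)) (v : Int) : Nat → Int → Option (List Int)
  | 0, _ => none
  | f + 1, x =>
      if x = v then some []
      else match (PySem.Dict.mk parents).get? x with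
        | none => none
        | some none => none
        | some (some p) => (pvChainTo parents v f p).map (x :: ·)

-- the full ancestor chain of x down to a root (parent None), all lookups defined
def pvChain (parents : List (Int × Option Int)) : Nat → Int → Option (List Int)
  | 0, _ => none
  | f + 1, x =>
      match (PySem.Dict.mk parents).get? x with
      | none => none
      | some none => some [x]
      | some (some p) => (pvChain parents f p).map (x :: ·)

-- the chain of x up to and including its first node lying in cu
def pvVPath (parents : List (Int × Option Int)) (cu : List Int) : Nat → Int → Option (List Int)
  | 0, _ => none
  | f + 1, x =>
      if x ∈ cu then some [x]
      else match (PySem.Dict.mk parents).get? x with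
        | none => none
        | some none => none
        | some (some p) => (pvVPath parents cu f p).map (x :: ·)

-- Pre_ = exactly the inputs on which Python A returns: either v is met on u's defined parent
-- chain, or u's chain reaches a root and v's chain reaches that chain; it excludes only inputs
-- where A raises KeyError (missing parent key) / AssertionError (no common ancestor) or loops
-- forever on a parent cycle. The Nodup conjuncts are implied by termination (a repeated node
-- would make the walk cycle) and exclude nothing further.
def pvPreB (u : Int) (v : Int) (parents : List (Int × Option Int)) : Bool :=
  match pvChainTo parents v (parents.length + 1) u with
  | some c => decide c.Nodup
  | none =>
      match pvChain parents (parents.length + 1) u with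
      | none => false
      | some cu =>
          decide cu.Nodup &&
          match pvVPath parents cu (parents.length + 1) v with
          | none => false
          | some pv => decide pv.Nodup

def Pre_tree_path (u : Int) (v : Int) (parents : List (Int × Option Int)) : Prop :=
  pvPreB u v parents = true

instance (u : Int) (v : Int) (parents : List (Int × Option Int)) : Decidable (Pre_tree_path u v parents) := by
  unfold Pre_tree_path; infer_instance

def pvWitness_tree_path : Int × Int × (List (Int × Option Int)) :=
  (0, 1, [(0, some 2), (1, some 2), (2, none)])

def Spec_tree_path (u : Int) (v : Int) (parents : List (Int × Option Int)) (out : Int) : Prop := out = tree_path_alt u v parents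
instance (u : Int) (v : Int) (parents : List (Int × Option Int)) (out : Int) : Decidable (Spec_tree_path u v parents out) := by unfold Spec_tree_path; infer_instance

-- ===== CLAIM (what is proved, stated in full; the proofs are below) =====
def Claim_equal_tree_path : Prop := ∀ (u : Int) (v : Int) (parents : List (Int × Option Int)), Dom_tree_path u v parents → Pre_tree_path u v parents → Spec_tree_path u v parents (tree_path u v parents)

-- ===== LEMMAS AND PROOFS =====

-- a None parent ends A's first loop regardless of remaining fuel
theorem treeLoop1_none (parents : List (Int × Option Int)) (v : Int) (f : Nat)
    (s : PySem.Set Int) (h : PySem.Dict Int Int) :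
    treeLoop1 parents v f none s h = .inr (s, h) := by cases f <;> rfl

-- A's first loop returns early with len(path1) when v lies on u's chain
theorem loop1A_early (parents : List (Int × Option Int)) (v : Int) :
    ∀ (f : Nat) (x : Int) (c : List Int) (s : PySem.Set Int) (h : PySem.Dict Int Int),
      pvChainTo parents v f x = some c → c.Nodup → (∀ y ∈ c, y ∉ s) →
      treeLoop1 parents v f (some x) s h = .inl (PySem.Set.len s + c.length) := by
  intro f
  induction f with
  | zero => intro x c s h hc _ _; simp [pvChainTo] at hc
  | succ f ih =>
    intro x c s h hc hnd hfresh
    by_cases hxv : x = v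
    · subst hxv
      simp [pvChainTo] at hc
      subst hc
      simp [treeLoop1, PySem.Set.len]
    · rw [pvChainTo, if_neg hxv] at hc
      cases hl : (PySem.Dict.mk parents).get? x with
      | none => rw [hl] at hc; simp at hc
      | some o =>
        cases o with
        | none => rw [hl] at hc; simp at hc
        | some p =>
          rw [hl] at hc
          simp only [] at hc
          cases hc' : pvChainTo parents v f p with
          | none => rw [hc'] at hc; simp at hc
          | some c' =>
            rw [hc'] at hc; simp at hc
            subst hc
            have hxns : x ∉ s := hfresh x (by simp)
            have hxnc' : x ∉ c' := by simp at hnd; exact hnd.1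
            rw [treeLoop1, if_neg hxv]
            have hadd : PySem.Set.add s x = s ++ [x] := PySem.Set.add_of_not_mem hxns
            have hlook : lookPar parents x = some p := by simp [lookPar, hl]
            simp only [hadd, hlook]
            rw [ih p c' (s ++ [x]) _ hc' (by simp at hnd; exact hnd.2)
                (by intro y hy; simp; exact ⟨hfresh y (by simp [hy]), fun he => hxnc' (he ▸ hy)⟩)]
            simp [PySem.Set.len]
            ring

-- if v lies on a full chain then the chain-to-v prefix exists
theorem chainTo_of_mem (parents : List (Int × Option Int)) (v : Int) :
    ∀ (f : Nat) (x : Int) (c : List Int),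
      pvChain parents f x = some c → v ∈ c → (pvChainTo parents v f x).isSome := by
  intro f
  induction f with
  | zero => intro x c hc _; simp [pvChain] at hc
  | succ f ih =>
    intro x c hc hv
    rw [pvChain] at hc
    by_cases hxv : x = v
    · rw [pvChainTo, if_pos hxv]; simp
    · rw [pvChainTo, if_neg hxv]
      cases hl : (PySem.Dict.mk parents).get? x with
      | none => rw [hl] at hc; simp at hc
      | some o =>
        cases o with
        | none =>
          rw [hl] at hc; simp at hc
          subst hc; simp at hv; exact absurd hv.symm hxv
        | some p =>
          rw [hl] at hc
          simp only [] at hc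
          cases hc' : pvChain parents f p with
          | none => rw [hc'] at hc; simp at hc
          | some c' =>
            rw [hc'] at hc; simp at hc
            subst hc
            simp at hv
            rcases hv with hv | hv
            · exact absurd hv.symm hxv
            · have := ih p c' hc' hv
              cases hct : pvChainTo parents v f p with
              | none => rw [hct] at this; simp at this
              | some q => simp [hct]

-- A's first loop, completed: path1 becomes s ++ c and history records 1-based positions
theorem loop1A_full (parents : List (Int × Option Int)) (v : Int) :
    ∀ (f : Nat) (x : Int) (c : List Int) (s : PySem.Set Int) (h : PySem.Dict Int Int),
      pvChain parents f x = some c → c.Nodup → v ∉ c → (∀ y ∈ c, y ∉ s) →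
      ∃ h', treeLoop1 parents v f (some x) s h = .inr (s ++ c, h') ∧
        ∀ y, h'.getD y 0 = if y ∈ c then PySem.Set.len s + c.idxOf y + 1 else h.getD y 0 := by
  intro f
  induction f with
  | zero => intro x c s h hc _ _ _; simp [pvChain] at hc
  | succ f ih =>
    intro x c s h hc hnd hv hfresh
    rw [pvChain] at hc
    cases hl : (PySem.Dict.mk parents).get? x with
    | none => rw [hl] at hc; simp at hc
    | some o =>
      cases o with
      | none =>
        rw [hl] at hc; simp at hc
        subst hc
        have hxv : x ≠ v := by simp at hv; exact fun he => hv he.symm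
        have hxns : x ∉ s := hfresh x (by simp)
        have hadd : PySem.Set.add s x = s ++ [x] := PySem.Set.add_of_not_mem hxns
        have hlook : lookPar parents x = none := by simp [lookPar, hl]
        have hstep : treeLoop1 parents v (f + 1) (some x) s h =
            treeLoop1 parents v f (lookPar parents x) (PySem.Set.add s x)
              (h.insert x (PySem.Set.len (PySem.Set.add s x))) := by
          rw [treeLoop1, if_neg hxv]
        refine ⟨h.insert x (PySem.Set.len (s ++ [x])), ?_, ?_⟩
        · rw [hstep, hadd, hlook, treeLoop1_none]
        · intro y
          by_cases hyx : y = x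
          · subst hyx
            simp [PySem.Set.len]
          · simp [PySem.Dict.getD_insert, hyx]
      | some p =>
        rw [hl] at hc
        simp only [] at hc
        cases hc' : pvChain parents f p with
        | none => rw [hc'] at hc; simp at hc
        | some c' =>
          rw [hc'] at hc; simp at hc
          subst hc
          simp at hnd hv
          have hxv : x ≠ v := fun he => hv.1 he.symm
          have hxnc' : x ∉ c' := hnd.1
          have hxns : x ∉ s := hfresh x (by simp)
          have hadd : PySem.Set.add s x = s ++ [x] := PySem.Set.add_of_not_mem hxns
          have hlook : lookPar parents x = some p := by simp [lookPar, hl]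
          have hstep : treeLoop1 parents v (f + 1) (some x) s h =
              treeLoop1 parents v f (lookPar parents x) (PySem.Set.add s x)
                (h.insert x (PySem.Set.len (PySem.Set.add s x))) := by
            rw [treeLoop1, if_neg hxv]
          obtain ⟨h', hrun, hval⟩ := ih p c' (s ++ [x]) (h.insert x (PySem.Set.len (s ++ [x])))
            hc' hnd.2 hv.2
            (by intro y hy; simp; exact ⟨hfresh y (by simp [hy]), fun he => hxnc' (he ▸ hy)⟩)
          refine ⟨h', ?_, ?_⟩
          · rw [hstep, hadd, hlook, hrun]; simp
          · intro y
            rw [hval y]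
            by_cases hyx : y = x
            · subst hyx
              simp [hxnc', PySem.Set.len]
            · by_cases hyc : y ∈ c'
              · simp [hyc, hyx, PySem.Set.len, List.idxOf_cons_ne _ (by exact fun h => hyx h.symm)]
                ring
              · simp [hyc, hyx, PySem.Dict.getD_insert]

-- the v-side path is a cu-free prefix followed by one node of cu
theorem vpath_decomp (parents : List (Int × Option Int)) (cu : List Int) :
    ∀ (f : Nat) (x : Int) (pv : List Int),
      pvVPath parents cu f x = some pv →
      ∃ qs w, pv = qs ++ [w] ∧ w ∈ cu ∧ ∀ y ∈ qs, y ∉ cu := by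
  intro f
  induction f with
  | zero => intro x pv hp; simp [pvVPath] at hp
  | succ f ih =>
    intro x pv hp
    rw [pvVPath] at hp
    by_cases hx : x ∈ cu
    · rw [if_pos hx] at hp; simp at hp; subst hp
      exact ⟨[], x, by simp, hx, by simp⟩
    · rw [if_neg hx] at hp
      cases hl : (PySem.Dict.mk parents).get? x with
      | none => rw [hl] at hp; simp at hp
      | some o =>
        cases o with
        | none => rw [hl] at hp; simp at hp
        | some p =>
          rw [hl] at hp
          simp only [] at hp
          cases hp' : pvVPath parents cu f p with
          | none => rw [hp'] at hp; simp at hp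
          | some q =>
            rw [hp'] at hp; simp at hp; subst hp
            obtain ⟨qs, w, hq, hw, hqs⟩ := ih p q hp'
            exact ⟨x :: qs, w, by simp [hq], hw, by
              intro y hy; simp at hy
              rcases hy with hy | hy
              · exact hy ▸ hx
              · exact hqs y hy⟩

-- A's second loop accumulates exactly the v-side path
theorem loop2A (parents : List (Int × Option Int)) (cu : List Int) :
    ∀ (f : Nat) (x : Int) (pv : List Int) (s2 : PySem.Set Int),
      pvVPath parents cu f x = some pv → pv.Nodup → (∀ y ∈ pv, y ∉ s2) →
      treeLoop2 parents cu f (some x) s2 = s2 ++ pv := by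
  intro f
  induction f with
  | zero => intro x pv s2 hp _ _; simp [pvVPath] at hp
  | succ f ih =>
    intro x pv s2 hp hnd hfresh
    rw [pvVPath] at hp
    by_cases hx : x ∈ cu
    · rw [if_pos hx] at hp; simp at hp; subst hp
      have hxns : x ∉ s2 := hfresh x (by simp)
      rw [treeLoop2]
      have hadd : PySem.Set.add s2 x = s2 ++ [x] := PySem.Set.add_of_not_mem hxns
      have hcont : PySem.Set.contains cu x = true := by
        simp [hx]
      simp only [hadd, hcont, if_pos]
    · rw [if_neg hx] at hp
      cases hl : (PySem.Dict.mk parents).get? x with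
      | none => rw [hl] at hp; simp at hp
      | some o =>
        cases o with
        | none => rw [hl] at hp; simp at hp
        | some p =>
          rw [hl] at hp
          simp only [] at hp
          cases hp' : pvVPath parents cu f p with
          | none => rw [hp'] at hp; simp at hp
          | some q =>
            rw [hp'] at hp; simp at hp; subst hp
            simp at hnd
            have hxnq : x ∉ q := hnd.1
            have hxns : x ∉ s2 := hfresh x (by simp)
            rw [treeLoop2]
            have hadd : PySem.Set.add s2 x = s2 ++ [x] := PySem.Set.add_of_not_mem hxns
            have hcont : PySem.Set.contains cu x = false := by
              simp [PySem.Set.contains]; exact hx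
            have hlook : lookPar parents x = some p := by simp [lookPar, hl]
            simp only [hadd, hcont, Bool.false_eq_true, hlook]
            rw [ih p q (s2 ++ [x]) hp' hnd.2
              (by intro y hy; simp; exact ⟨hfresh y (by simp [hy]), fun he => hxnq (he ▸ hy)⟩)]
            simp

-- a Nodup list filtered by a predicate true exactly at one member w gives [w]
theorem filter_singleton (w : Int) (p : Int → Bool) :
    ∀ (l : List Int), l.Nodup → w ∈ l → p w = true → (∀ y ∈ l, p y = true → y = w) →
      l.filter p = [w] := by
  intro l
  induction l with
  | nil => intro _ hw; simp at hw
  | cons a as ih =>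
    intro hnd hw hpw hall
    simp at hnd
    by_cases haw : a = w
    · subst haw
      have : as.filter p = [] := by
        apply List.filter_eq_nil_iff.mpr
        intro y hy hpy
        exact hnd.1 ((hall y (by simp [hy]) hpy) ▸ hy)
      simp [hpw, this]
    · have hpa : p a = false := by
        cases hpa : p a with
        | false => rfl
        | true => exact absurd (hall a (by simp) hpa) haw
      have hw' : w ∈ as := by
        simp at hw; rcases hw with hw | hw
        · exact absurd hw.symm haw
        · exact hw
      rw [List.filter_cons_of_neg (by simp [hpa])]
      exact ih hnd.2 hw' hpw (fun y hy => hall y (by simp [hy]))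

-- B's first loop breaks (lca = v) when v lies on u's chain
theorem altFind_early (parents : List (Int × Option Int)) (v : Int) :
    ∀ (f : Nat) (x : Int) (c : List Int) (s : PySem.Set Int),
      pvChainTo parents v f x = some c →
      altFind parents v f (some x) s = .inl () := by
  intro f
  induction f with
  | zero => intro x c s hc; simp [pvChainTo] at hc
  | succ f ih =>
    intro x c s hc
    by_cases hxv : x = v
    · subst hxv; simp [altFind]
    · rw [pvChainTo, if_neg hxv] at hc
      cases hl : (PySem.Dict.mk parents).get? x with
      | none => rw [hl] at hc; simp at hc
      | some o =>
        cases o with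
        | none => rw [hl] at hc; simp at hc
        | some p =>
          rw [hl] at hc
          simp only [] at hc
          cases hc' : pvChainTo parents v f p with
          | none => rw [hc'] at hc; simp at hc
          | some c' =>
            rw [altFind, if_neg hxv]
            have hlook : lookPar parents x = some p := by simp [lookPar, hl]
            rw [hlook]
            exact ih p c' _ hc'

-- B's first loop, completed: the ancestor set becomes s ++ cu
theorem altFind_full (parents : List (Int × Option Int)) (v : Int) :
    ∀ (f : Nat) (x : Int) (c : List Int) (s : PySem.Set Int),
      pvChain parents f x = some c → c.Nodup → v ∉ c → (∀ y ∈ c, y ∉ s) →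
      altFind parents v f (some x) s = .inr (s ++ c) := by
  intro f
  induction f with
  | zero => intro x c s hc _ _ _; simp [pvChain] at hc
  | succ f ih =>
    intro x c s hc hnd hv hfresh
    rw [pvChain] at hc
    cases hl : (PySem.Dict.mk parents).get? x with
    | none => rw [hl] at hc; simp at hc
    | some o =>
      cases o with
      | none =>
        rw [hl] at hc; simp at hc
        subst hc
        have hxv : x ≠ v := by simp at hv; exact fun he => hv he.symm
        have hxns : x ∉ s := hfresh x (by simp)
        have hadd : PySem.Set.add s x = s ++ [x] := PySem.Set.add_of_not_mem hxns
        have hlook : lookPar parents x = none := by simp [lookPar, hl]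
        rw [altFind, if_neg hxv, hlook, hadd]
        cases f <;> rfl
      | some p =>
        rw [hl] at hc
        simp only [] at hc
        cases hc' : pvChain parents f p with
        | none => rw [hc'] at hc; simp at hc
        | some c' =>
          rw [hc'] at hc; simp at hc
          subst hc
          simp at hnd hv
          have hxv : x ≠ v := fun he => hv.1 he.symm
          have hxnc' : x ∉ c' := hnd.1
          have hxns : x ∉ s := hfresh x (by simp)
          have hadd : PySem.Set.add s x = s ++ [x] := PySem.Set.add_of_not_mem hxns
          have hlook : lookPar parents x = some p := by simp [lookPar, hl]
          rw [altFind, if_neg hxv, hlook, hadd]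
          rw [ih p c' (s ++ [x]) hc' hnd.2 hv.2
            (by intro y hy; simp; exact ⟨hfresh y (by simp [hy]), fun he => hxnc' (he ▸ hy)⟩)]
          simp

-- B's second loop returns the single cu-node ending the v-side path
theorem altScan_finds (parents : List (Int × Option Int)) (cu : List Int) :
    ∀ (f : Nat) (x : Int) (qs : List Int) (w : Int),
      pvVPath parents cu f x = some (qs ++ [w]) → w ∈ cu → (∀ y ∈ qs, y ∉ cu) →
      altScan parents cu f (some x) = some w := by
  intro f
  induction f with
  | zero => intro x qs w hp _ _; simp [pvVPath] at hp
  | succ f ih =>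
    intro x qs w hp hw hqs
    rw [pvVPath] at hp
    by_cases hx : x ∈ cu
    · rw [if_pos hx] at hp
      cases qs with
      | nil =>
        have hwx : x = w := by simpa using hp
        subst hwx
        rw [altScan]
        have hcont : PySem.Set.contains cu x = true := by
          simp [hx]
        rw [if_pos hcont]
      | cons a as => simp at hp
    · rw [if_neg hx] at hp
      cases hl : (PySem.Dict.mk parents).get? x with
      | none => rw [hl] at hp; simp at hp
      | some o =>
        cases o with
        | none => rw [hl] at hp; simp at hp
        | some p =>
          rw [hl] at hp
          simp only [] at hp
          cases hp' : pvVPath parents cu f p with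
          | none => rw [hp'] at hp; simp at hp
          | some q =>
            rw [hp'] at hp; simp at hp
            cases qs with
            | nil =>
              simp at hp
              exact absurd (hp.1 ▸ hw) hx
            | cons a as =>
              simp at hp
              rw [altScan]
              have hcont : PySem.Set.contains cu x = false := by
                simp [PySem.Set.contains]; exact hx
              have hlook : lookPar parents x = some p := by simp [lookPar, hl]
              simp only [hcont, Bool.false_eq_true, hlook]
              exact ih p as w (by rw [hp', hp.2]) hw (fun y hy => hqs y (by simp [hy]))

-- _steps from x to v counts the chain-to-v prefix
theorem altSteps_chainTo (parents : List (Int × Option Int)) (v : Int) :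
    ∀ (f : Nat) (x : Int) (c : List Int) (d : Int),
      pvChainTo parents v f x = some c →
      altSteps parents v f (some x) d = d + c.length := by
  intro f
  induction f with
  | zero => intro x c d hc; simp [pvChainTo] at hc
  | succ f ih =>
    intro x c d hc
    by_cases hxv : x = v
    · subst hxv
      simp [pvChainTo] at hc
      subst hc
      simp [altSteps]
    · rw [pvChainTo, if_neg hxv] at hc
      cases hl : (PySem.Dict.mk parents).get? x with
      | none => rw [hl] at hc; simp at hc
      | some o =>
        cases o with
        | none => rw [hl] at hc; simp at hc
        | some p =>
          rw [hl] at hc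
          simp only [] at hc
          cases hc' : pvChainTo parents v f p with
          | none => rw [hc'] at hc; simp at hc
          | some c' =>
            rw [hc'] at hc; simp at hc
            subst hc
            rw [altSteps, if_neg hxv]
            have hlook : lookPar parents x = some p := by simp [lookPar, hl]
            rw [hlook, ih p c' (d + 1) hc']
            simp only [List.length_cons]
            push_cast; omega

-- _steps from x to a member w of x's full chain counts w's index on that chain
theorem altSteps_chain (parents : List (Int × Option Int)) (w : Int) :
    ∀ (f : Nat) (x : Int) (c : List Int) (d : Int),
      pvChain parents f x = some c → w ∈ c →
      altSteps parents w f (some x) d = d + c.idxOf w := by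
  intro f
  induction f with
  | zero => intro x c d hc _; simp [pvChain] at hc
  | succ f ih =>
    intro x c d hc hw
    by_cases hxw : x = w
    · subst hxw
      rw [altSteps, if_pos rfl]
      rw [pvChain] at hc
      cases hl : (PySem.Dict.mk parents).get? x with
      | none => rw [hl] at hc; simp at hc
      | some o =>
        cases o with
        | none =>
          rw [hl] at hc; simp at hc; subst hc; simp
        | some p =>
          rw [hl] at hc
          simp only [] at hc
          cases hc' : pvChain parents f p with
          | none => rw [hc'] at hc; simp at hc
          | some c' => rw [hc'] at hc; simp at hc; subst hc; simp
    · rw [pvChain] at hc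
      cases hl : (PySem.Dict.mk parents).get? x with
      | none => rw [hl] at hc; simp at hc
      | some o =>
        cases o with
        | none =>
          rw [hl] at hc; simp at hc; subst hc
          simp at hw; exact absurd hw.symm hxw
        | some p =>
          rw [hl] at hc
          simp only [] at hc
          cases hc' : pvChain parents f p with
          | none => rw [hc'] at hc; simp at hc
          | some c' =>
            rw [hc'] at hc; simp at hc
            subst hc
            simp at hw
            rcases hw with hw | hw
            · exact absurd hw.symm hxw
            · rw [altSteps, if_neg hxw]
              have hlook : lookPar parents x = some p := by simp [lookPar, hl]
              rw [hlook, ih p c' (d + 1) hc' hw]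
              rw [List.idxOf_cons_ne _ hxw]
              push_cast; omega

-- _steps from v along the v-side path to its endpoint w counts the prefix
theorem altSteps_vpath (parents : List (Int × Option Int)) (cu : List Int) :
    ∀ (f : Nat) (x : Int) (qs : List Int) (w : Int) (d : Int),
      pvVPath parents cu f x = some (qs ++ [w]) → w ∈ cu → (∀ y ∈ qs, y ∉ cu) →
      altSteps parents w f (some x) d = d + qs.length := by
  intro f
  induction f with
  | zero => intro x qs w d hp _ _; simp [pvVPath] at hp
  | succ f ih =>
    intro x qs w d hp hw hqs
    rw [pvVPath] at hp
    by_cases hx : x ∈ cu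
    · rw [if_pos hx] at hp
      cases qs with
      | nil =>
        have hwx : x = w := by simpa using hp
        subst hwx
        rw [altSteps, if_pos rfl]
        simp
      | cons a as => simp at hp
    · rw [if_neg hx] at hp
      cases hl : (PySem.Dict.mk parents).get? x with
      | none => rw [hl] at hp; simp at hp
      | some o =>
        cases o with
        | none => rw [hl] at hp; simp at hp
        | some p =>
          rw [hl] at hp
          simp only [] at hp
          cases hp' : pvVPath parents cu f p with
          | none => rw [hp'] at hp; simp at hp
          | some q =>
            rw [hp'] at hp; simp at hp
            cases qs with
            | nil =>
              simp at hp
              exact absurd (hp.1 ▸ hw) hx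
            | cons a as =>
              simp at hp
              have hxw : x ≠ w := fun he => hx (he ▸ hw)
              rw [altSteps, if_neg hxw]
              have hlook : lookPar parents x = some p := by simp [lookPar, hl]
              rw [hlook, ih p as w (d + 1) (by rw [hp', hp.2]) hw
                (fun y hy => hqs y (by simp [hy]))]
              simp only [List.length_cons]
              push_cast; omega

-- ===== VERDICT (by name: the statement is the Claim_ definition above) =====
theorem tree_path_spec : Claim_equal_tree_path := by
  intro u v parents _hdom hpre
  unfold Spec_tree_path
  unfold Pre_tree_path pvPreB at hpre
  set F := parents.length + 1 with hF
  cases hct : pvChainTo parents v F u with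
  | some c =>
    rw [hct] at hpre
    simp at hpre
    have hA := loop1A_early parents v F u c PySem.Set.empty PySem.Dict.empty hct hpre (by simp [PySem.Set.empty])
    have hB := altFind_early parents v F u c PySem.Set.empty hct
    unfold tree_path tree_path_alt
    rw [← hF, hA, hB]
    have hu := altSteps_chainTo parents v F u c 0 hct
    have hv : altSteps parents v F (some v) 0 = 0 := by
      rw [hF, altSteps, if_pos rfl]
    rw [hu, hv]
    simp [PySem.Set.len, PySem.Set.empty]
  | none =>
    rw [hct] at hpre
    simp only [] at hpre
    cases hch : pvChain parents F u with
    | none => rw [hch] at hpre; simp at hpre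
    | some cu =>
      rw [hch] at hpre
      simp only [] at hpre
      cases hvp : pvVPath parents cu F v with
      | none => rw [hvp] at hpre; simp at hpre
      | some pv =>
        rw [hvp] at hpre
        simp at hpre
        obtain ⟨hndcu, hndpv⟩ := hpre
        have hvncu : v ∉ cu := by
          intro hv
          have := chainTo_of_mem parents v F u cu hch hv
          rw [hct] at this; simp at this
        obtain ⟨h', hrunA, hvalA⟩ := loop1A_full parents v F u cu PySem.Set.empty
          PySem.Dict.empty hch hndcu hvncu (by simp [PySem.Set.empty])
        have hrunB := altFind_full parents v F u cu PySem.Set.empty hch hndcu hvncu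
          (by simp [PySem.Set.empty])
        obtain ⟨qs, w, hpvq, hwcu, hqs⟩ := vpath_decomp parents cu F v pv hvp
        have hpath2 := loop2A parents cu F v pv PySem.Set.empty hvp hndpv (by simp [PySem.Set.empty])
        have hscan := altScan_finds parents cu F v qs w (by rw [hvp, hpvq]) hwcu hqs
        have hstepu := altSteps_chain parents w F u cu 0 hch hwcu
        have hstepv := altSteps_vpath parents cu F v qs w 0 (by rw [hvp, hpvq]) hwcu hqs
        unfold tree_path tree_path_alt
        rw [← hF, hrunA, hrunB]
        simp only [PySem.Set.empty, List.nil_append] at hpath2 hvalA hrunB ⊢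
        rw [hpath2, hscan]
        show _ = altSteps parents w F (some u) 0 + altSteps parents w F (some v) 0
        rw [hstepu, hstepv]
        have hinter : PySem.Set.inter cu pv = [w] := by
          unfold PySem.Set.inter
          apply filter_singleton w _ cu hndcu hwcu
          · simp [PySem.Set.contains, hpvq]
          · intro y hy hpy
            simp [PySem.Set.contains, hpvq] at hpy
            rcases hpy with hpy | hpy
            · exact absurd hy (hqs y hpy)
            · exact hpy
        rw [hinter]
        show PySem.Set.len pv + h'.getD w 0 - 2 = _
        rw [hvalA w]
        simp only [if_pos hwcu]
        simp [PySem.Set.len, hpvq]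
        ring
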